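-- pv_equiv track=rewrite | github.com/hammer2383/Dynamo-Python | ArtInstallationPatternMaker/ArtPatternmaker4Type.py | VNextNumber
-- ===== SOURCE A (Python) =====
-- def VNextNumber(topright):
--     """Determine the next number based on the preultimate number in diagonal direction(buttom left to right).
--
--     the function check which pair number belonged to and return on of its pair.
--     The topright agrument is usually top right from the previous number (hence the name)
--     [1,3,1]
--     [4,5,4] top right of 4 will be 3 in graphical sense.
--
--     Args:
--         n (int): preultimate number
--
--     Returns:
--         int: next number according to local norseq
--     """
--
--     nextnum = 0
--     # dianogal pairs
--     seq = ((1, 4),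
--            (2, 3))
--
--     if topright == 0:
--         nextnum = 0
--     else:
--         for s in seq:
--             if topright in s:
--                 tseq = list(s[:])
--                 tseq.remove(topright)
--                 nextnum = tseq[0]
--     return nextnum
-- ===== SOURCE B (Python) =====
-- def VNextNumber(topright):
--     # Closed form: each diagonal pair (1,4),(2,3) sums to 5.
--     return 5 - topright if topright in (1, 2, 3, 4) else 0
-- ===== Notes on version B (the rewrite author's own statement) =====
-- stated objective: simpler
-- what changed: Replaces the pair-table scan with list copy/remove by the closed-form arithmetic 5 - topright guarded by membership in {1,2,3,4}.
import Mathlib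
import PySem

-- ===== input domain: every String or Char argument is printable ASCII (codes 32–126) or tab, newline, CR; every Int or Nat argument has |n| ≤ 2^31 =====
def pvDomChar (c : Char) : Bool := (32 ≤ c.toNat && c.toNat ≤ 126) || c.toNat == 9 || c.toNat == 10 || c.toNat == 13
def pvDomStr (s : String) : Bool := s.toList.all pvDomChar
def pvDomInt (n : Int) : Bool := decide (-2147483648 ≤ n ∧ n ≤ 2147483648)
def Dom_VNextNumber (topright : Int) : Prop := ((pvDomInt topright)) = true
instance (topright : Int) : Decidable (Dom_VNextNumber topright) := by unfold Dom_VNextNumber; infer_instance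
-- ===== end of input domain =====

-- B replaces A's pair-table scan (copy the pair, remove the match, take the remainder)
-- by the closed form 5 - topright guarded by membership in {1,2,3,4}; objective: simpler.

-- ===== PORT A =====
-- one iteration of A's `for s in seq` body
def pvVNextStep (topright : Int) (nextnum : Int) (s : List Int) : Int :=
  if s.contains topright then
    -- tseq = list(s[:]); tseq.remove(topright); nextnum = tseq[0]
    match PySem.List.remove? s topright with
    | some tseq => (PySem.List.pyGet? tseq 0).getD nextnum
    | none => nextnum
  else nextnum

def VNextNumber (topright : Int) : Int :=
  let seq : List (List Int) := [[1, 4], [2, 3]]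
  if topright == 0 then 0
  else seq.foldl (pvVNextStep topright) 0

-- ===== PORT B =====
def VNextNumber_alt (topright : Int) : Int :=
  if topright == 1 || topright == 2 || topright == 3 || topright == 4 then 5 - topright else 0

-- ===== PRECONDITION & SPEC =====
def Spec_VNextNumber (topright : Int) (out : Int) : Prop := out = VNextNumber_alt topright
instance (topright : Int) (out : Int) : Decidable (Spec_VNextNumber topright out) := by unfold Spec_VNextNumber; infer_instance

-- ===== CLAIM (what is proved, stated in full; the proofs are below) =====
def Claim_equal_VNextNumber : Prop := ∀ (topright : Int), Dom_VNextNumber topright → Spec_VNextNumber topright (VNextNumber topright)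

-- ===== LEMMAS AND PROOFS =====

-- ===== VERDICT (by name: the statement is the Claim_ definition above) =====
theorem VNextNumber_spec : Claim_equal_VNextNumber := by
  intro t _
  unfold Spec_VNextNumber VNextNumber VNextNumber_alt pvVNextStep
  by_cases h1 : t = 1 <;> by_cases h2 : t = 2 <;> by_cases h3 : t = 3 <;> by_cases h4 : t = 4 <;>
    simp [h1, h2, h3, h4, List.foldl, PySem.List.remove?, PySem.List.pyGet?, PySem.List.pyIdx?] <;>
    decide
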